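-- pv_equiv track=rewrite | github.com/llouis0622/Algorithm_Deep_Dive | Programmers/Lv. 0/[PCCE] 지폐 접기.py | solution
-- ===== SOURCE A (Python) =====
-- def solution(wallet, bill):
--     normal = 0
--     rotate = 0
--     num_normal = bill[:]
--     while num_normal[0] > wallet[0] or num_normal[1] > wallet[1]:
--         if num_normal[0] > num_normal[1]:
--             num_normal[0] //= 2
--         else:
--             num_normal[1] //= 2
--         normal += 1
--     num_rotate = [bill[1], bill[0]]
--     while num_rotate[0] > wallet[0] or num_rotate[1] > wallet[1]:
--         if num_rotate[0] > num_rotate[1]: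
--             num_rotate[0] //= 2
--         else:
--             num_rotate[1] //= 2
--         rotate += 1
--     return min(normal, rotate)
-- ===== SOURCE B (Python) =====
-- def solution(wallet, bill):
--     # Keep both rectangles as sorted (short, long) pairs; fold the long side
--     # of the bill in half until it fits the wallet in some orientation.
--     w = sorted(wallet[:2])
--     b = sorted(bill[:2])
--     folds = 0
--     while b[0] > w[0] or b[1] > w[1]:
--         b[1] //= 2
--         b.sort()
--         folds += 1
--     return folds
-- ===== Notes on version B (the rewrite author's own statement) =====
-- stated objective: simpler
-- what changed: B replaces A's two fixed-orientation fold loops plus min by one loop that keeps the bill as a sorted (short, long) pair, halves the long side and compares against the sorted wallet; this also fixes A's overcount when its scans lock into one orientation after the bill's sides tie.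
-- intended difference: When wallet[0] < wallet[1] and the halve-the-longer fold sequence of the bill reaches a square (tied) state before it first fits, A's two scans both end up holding the long side in slot 0 and keep folding until it also fits the smaller wallet dimension, returning an overcount; B returns the true minimal fold count (e.g. wallet [2,10], bill [5,5]: A returns 2, B returns 1, though one fold gives 5x2 which already fits the 2x10 wallet rotated). — e.g. on solution([2, 10], [5, 5]): A returns 2, B returns 1
import Mathlib
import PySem

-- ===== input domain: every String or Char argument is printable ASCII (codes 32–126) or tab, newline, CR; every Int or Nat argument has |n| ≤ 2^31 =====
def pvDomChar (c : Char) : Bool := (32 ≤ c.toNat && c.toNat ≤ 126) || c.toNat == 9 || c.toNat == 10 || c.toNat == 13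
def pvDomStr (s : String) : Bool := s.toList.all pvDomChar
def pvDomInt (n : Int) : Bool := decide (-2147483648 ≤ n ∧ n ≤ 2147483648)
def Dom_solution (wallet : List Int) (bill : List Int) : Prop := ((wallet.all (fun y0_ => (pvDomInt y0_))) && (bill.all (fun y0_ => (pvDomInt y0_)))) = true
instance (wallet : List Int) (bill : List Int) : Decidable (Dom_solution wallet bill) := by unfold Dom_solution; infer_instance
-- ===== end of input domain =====

-- B keeps the bill as one sorted (short, long) pair and folds the long side until it fits
-- the sorted wallet (one loop instead of A's two fixed-orientation loops + min); on inputs in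
-- D_solution below this also fixes A's overcount.

-- fuel guard for the while-loops (Python has none; under Dom ∧ Pre_ each loop halves an
-- integer of magnitude ≤ 2^31 per step, so it stops well before 128 iterations)
def solFuel : Nat := 128

-- ===== PORT A =====
-- `while num[0] > wallet[0] or num[1] > wallet[1]: halve the larger; count += 1`
-- (only indices 0 and 1 of the copied list are ever used)
def solFoldA (w0 w1 : Int) : Nat → Int → Int → Int → Int
  | 0, _, _, acc => acc
  | f+1, p, q, acc =>
    if p > w0 ∨ q > w1 then
      if p > q then solFoldA w0 w1 f (PySem.Int.floordiv p 2) q (acc + 1)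
      else solFoldA w0 w1 f p (PySem.Int.floordiv q 2) (acc + 1)
    else acc

def solution (wallet : List Int) (bill : List Int) : Int :=
  let w0 := (PySem.List.pyGet? wallet 0).getD 0   -- Pre_ guarantees the lookups hit (Python raises IndexError otherwise)
  let w1 := (PySem.List.pyGet? wallet 1).getD 0
  let b0 := (PySem.List.pyGet? bill 0).getD 0
  let b1 := (PySem.List.pyGet? bill 1).getD 0
  let normal := solFoldA w0 w1 solFuel b0 b1 0
  let rotate := solFoldA w0 w1 solFuel b1 b0 0
  min normal rotate

-- ===== PORT B =====
-- `while b[0] > w[0] or b[1] > w[1]: b[1] //= 2; b.sort(); folds += 1`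
-- (b.sort() on the two-element list = (min, max) of the pair)
def solFoldB (s0 s1 : Int) : Nat → Int → Int → Int → Int
  | 0, _, _, folds => folds
  | f+1, lo, hi, folds =>
    if lo > s0 ∨ hi > s1 then
      let h := PySem.Int.floordiv hi 2
      solFoldB s0 s1 f (min lo h) (max lo h) (folds + 1)
    else folds

def solution_alt (wallet : List Int) (bill : List Int) : Int :=
  let w0 := (PySem.List.pyGet? wallet 0).getD 0
  let w1 := (PySem.List.pyGet? wallet 1).getD 0
  let b0 := (PySem.List.pyGet? bill 0).getD 0
  let b1 := (PySem.List.pyGet? bill 1).getD 0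
  -- w = sorted(wallet[:2]); b = sorted(bill[:2])
  solFoldB (min w0 w1) (max w0 w1) solFuel (min b0 b1) (max b0 b1) 0

-- ===== PRECONDITION & SPEC =====
-- Pre_ excludes exactly the inputs where Python A does not return: lists shorter than 2
-- (IndexError), and wallets with a negative dimension unless the bill already fits in both
-- orientations — with a negative wallet dimension, halving can never bring a bill dimension
-- down to it, so A's while-loops diverge in every other case.
def Pre_solution (wallet : List Int) (bill : List Int) : Prop :=
  2 ≤ wallet.length ∧ 2 ≤ bill.length ∧
  ((0 ≤ wallet.getD 0 0 ∧ 0 ≤ wallet.getD 1 0) ∨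
   (bill.getD 0 0 ≤ wallet.getD 0 0 ∧ bill.getD 1 0 ≤ wallet.getD 1 0 ∧
    bill.getD 1 0 ≤ wallet.getD 0 0 ∧ bill.getD 0 0 ≤ wallet.getD 1 0))
instance (wallet : List Int) (bill : List Int) : Decidable (Pre_solution wallet bill) := by
  unfold Pre_solution; infer_instance

def pvWitness_solution : List Int × List Int := ([30, 15], [26, 17])

-- On the inputs below A returns an overcount: once the bill's halve-the-longer fold sequence
-- ties (becomes square) before fitting, A's two scans coincide with the long side locked into
-- slot 0, so A keeps folding until the long side also fits wallet[0] even though the bill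
-- already fits rotated; B returns the true minimal fold count there.  Closed form: the fold
-- values of a bill side are its halving stages b/2^k, the two sides' stage chains first meet at
-- their largest common stage, and A overcounts exactly when some common stage q of the two
-- sides lands in (wallet[0], wallet[1]] while its next stage q/2 already fits wallet[0].
def solDiffP (w0 w1 b0 b1 : Int) : Prop :=
  w0 < w1 ∧ ∃ a < 33, ∃ b < 33,
    b0 / 2^a = b1 / 2^b ∧ b0 / 2^a / 2 ≤ w0 ∧ w0 < b0 / 2^a ∧ b0 / 2^a ≤ w1

def D_solution (wallet : List Int) (bill : List Int) : Prop :=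
  solDiffP (wallet.getD 0 0) (wallet.getD 1 0) (bill.getD 0 0) (bill.getD 1 0)
instance (wallet : List Int) (bill : List Int) : Decidable (D_solution wallet bill) := by
  unfold D_solution solDiffP; infer_instance

def Spec_solution (wallet : List Int) (bill : List Int) (out : Int) : Prop :=
  ¬ D_solution wallet bill → out = solution_alt wallet bill
instance (wallet : List Int) (bill : List Int) (out : Int) : Decidable (Spec_solution wallet bill out) := by
  unfold Spec_solution; infer_instance

def pvDiffWitness_solution : List Int × List Int := ([2, 10], [5, 5])
def pvDiffWitnessOut_solution : Int × Int := (2, 1)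

-- ===== CLAIM (what is proved, stated in full; the proofs are below) =====
def Claim_unchanged_solution : Prop := ∀ (wallet : List Int) (bill : List Int), Dom_solution wallet bill → Pre_solution wallet bill → Spec_solution wallet bill (solution wallet bill)
def Claim_changed_solution : Prop := Dom_solution (pvDiffWitness_solution.1) (pvDiffWitness_solution.2) ∧ Pre_solution (pvDiffWitness_solution.1) (pvDiffWitness_solution.2) ∧ D_solution (pvDiffWitness_solution.1) (pvDiffWitness_solution.2) ∧ solution (pvDiffWitness_solution.1) (pvDiffWitness_solution.2) = pvDiffWitnessOut_solution.1 ∧ solution_alt (pvDiffWitness_solution.1) (pvDiffWitness_solution.2) = pvDiffWitnessOut_solution.2 ∧ pvDiffWitnessOut_solution.1 ≠ pvDiffWitnessOut_solution.2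

-- ===== LEMMAS AND PROOFS =====

-- proof-side simulation of the fold sequence: runs until the pair first fits the sorted
-- wallet, remembering in t whether a tied (square) state was passed; true iff that fit is
-- rotated-only (long side still > w0).  Fuel is an exact bound (the long side halves
-- at least every second step); used to mediate between the loops and the closed form D_.
def solDAux (w0 w1 : Int) : Nat → Bool → Int → Int → Bool
  | 0, _, _, _ => false
  | n+1, t, lo, hi =>
    if hi ≤ 0 then false
    else if lo ≤ w0 ∧ hi ≤ w1 then t && decide (w0 < hi)
    else solDAux w0 w1 n (t || decide (lo = hi))
      (min lo (PySem.Int.floordiv hi 2)) (max lo (PySem.Int.floordiv hi 2))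

def solD (w0 w1 : Int) (t : Bool) (lo hi : Int) : Bool :=
  solDAux w0 w1 (2 * hi.toNat + 2) t lo hi

theorem solDAux_succ (w0 w1 : Int) (n : Nat) (t : Bool) (lo hi : Int) :
    solDAux w0 w1 (n+1) t lo hi =
      if hi ≤ 0 then false
      else if lo ≤ w0 ∧ hi ≤ w1 then t && decide (w0 < hi)
      else solDAux w0 w1 n (t || decide (lo = hi))
        (min lo (PySem.Int.floordiv hi 2)) (max lo (PySem.Int.floordiv hi 2)) := rfl

-- composing halving stages
theorem solDPow (x : Int) (k : Nat) : x / 2^k / 2 = x / 2^(k+1) := by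
  rw [Int.ediv_ediv_of_nonneg (by positivity), pow_succ]

-- invariant of solDAux runs: before a tie the two sides are stages of the two original
-- sides (in some order); after it the long side is a common stage and the pair is
-- (q, q) or (q/2, q)
def solStages (lo0 hi0 : Int) (t : Bool) (lo hi : Int) : Prop :=
  match t with
  | true => (∃ A : Nat, hi = lo0 / 2^A) ∧ (∃ B : Nat, hi = hi0 / 2^B) ∧ (lo = hi ∨ lo = hi / 2)
  | false => ((∃ x : Nat, lo = lo0 / 2^x) ∧ (∃ y : Nat, hi = hi0 / 2^y)) ∨
             ((∃ x : Nat, lo = hi0 / 2^x) ∧ (∃ y : Nat, hi = lo0 / 2^y))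

-- a successful solDAux run exhibits the closed-form witness of D_
theorem solDAux_imp (w0 w1 lo0 hi0 : Int)
    (hs0 : lo0 ≤ 2147483648) (hs1 : hi0 ≤ 2147483648) :
    ∀ (n : Nat) (t : Bool) (lo hi : Int), lo ≤ hi → solStages lo0 hi0 t lo hi →
      solDAux w0 w1 n t lo hi = true →
      ∃ a, a < 33 ∧ ∃ b, b < 33 ∧ lo0 / 2^a = hi0 / 2^b ∧
        lo0 / 2^a / 2 ≤ w0 ∧ w0 < lo0 / 2^a ∧ lo0 / 2^a ≤ w1 := by
  intro n
  induction n with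
  | zero => intro t lo hi _ _ h; simp [solDAux] at h
  | succ n ih =>
    intro t lo hi hlh hinv h
    rw [solDAux_succ] at h
    split_ifs at h with g1 g2
    · -- the run stops fitted: t = true and w0 < hi
      simp only [Bool.and_eq_true, decide_eq_true_eq] at h
      obtain ⟨ht, hwhi⟩ := h
      subst ht
      obtain ⟨⟨A, hA⟩, ⟨B, hB⟩, hsh⟩ := hinv
      have hlo : lo = hi / 2 := by
        rcases hsh with h' | h'
        · omega
        · exact h'
      have hbound : ∀ (x0 : Int) (C : Nat), x0 ≤ 2147483648 → hi = x0 / 2^C → C < 33 := by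
        intro x0 C hx0 hC
        by_contra hcon
        have h1le : (1:Int) ≤ x0 / 2^C := by omega
        rw [Int.le_ediv_iff_mul_le (by positivity)] at h1le
        have h233 : (2:Int)^33 ≤ 2^C := by
          refine pow_le_pow_right₀ (by norm_num) (by omega)
        have h2v : ((2:Int)^33 : Int) = 8589934592 := by norm_num
        have := h1le
        simp only [one_mul] at this
        omega
      refine ⟨A, hbound lo0 A hs0 hA, B, hbound hi0 B hs1 hB, by omega, ?_, by omega, by omega⟩
      rw [← hA, ← hlo]
      omega
    · -- the run steps: preserve the invariant
      have hhi1 : 1 ≤ hi := by omega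
      have hfd : PySem.Int.floordiv hi 2 = hi / 2 :=
        PySem.Int.floordiv_eq_ediv_of_pos (by omega)
      have hfb : 0 ≤ hi / 2 ∧ hi / 2 < hi := by omega
      have hsort : min lo (PySem.Int.floordiv hi 2) ≤ max lo (PySem.Int.floordiv hi 2) := by
        omega
      refine ih _ _ _ hsort ?_ h
      cases t with
      | false =>
        by_cases hde : lo = hi
        · rw [show (decide (lo = hi) = true) from decide_eq_true hde]
          have e1 : min lo (PySem.Int.floordiv hi 2) = hi / 2 := by omega
          have e2 : max lo (PySem.Int.floordiv hi 2) = hi := by omega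
          rw [Bool.or_true, e1, e2]
          have hcom : (∃ A : Nat, hi = lo0 / 2^A) ∧ (∃ B : Nat, hi = hi0 / 2^B) := by
            rcases hinv with ⟨⟨x, hx⟩, ⟨y, hy⟩⟩ | ⟨⟨x, hx⟩, ⟨y, hy⟩⟩
            · exact ⟨⟨x, by omega⟩, ⟨y, hy⟩⟩
            · exact ⟨⟨y, hy⟩, ⟨x, by omega⟩⟩
          exact ⟨hcom.1, hcom.2, Or.inr rfl⟩
        · rw [show (decide (lo = hi) = false) from decide_eq_false hde, Bool.or_false]
          rcases hinv with ⟨⟨x, hx⟩, ⟨y, hy⟩⟩ | ⟨⟨x, hx⟩, ⟨y, hy⟩⟩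
          · rcases le_total lo (PySem.Int.floordiv hi 2) with hc | hc
            · have e1 : min lo (PySem.Int.floordiv hi 2) = lo := by omega
              have e2 : max lo (PySem.Int.floordiv hi 2) = hi / 2 := by omega
              rw [e1, e2]
              exact Or.inl ⟨⟨x, hx⟩, ⟨y + 1, by rw [← solDPow, ← hy]⟩⟩
            · have e1 : min lo (PySem.Int.floordiv hi 2) = hi / 2 := by omega
              have e2 : max lo (PySem.Int.floordiv hi 2) = lo := by omega
              rw [e1, e2]
              exact Or.inr ⟨⟨y + 1, by rw [← solDPow, ← hy]⟩, ⟨x, hx⟩⟩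
          · rcases le_total lo (PySem.Int.floordiv hi 2) with hc | hc
            · have e1 : min lo (PySem.Int.floordiv hi 2) = lo := by omega
              have e2 : max lo (PySem.Int.floordiv hi 2) = hi / 2 := by omega
              rw [e1, e2]
              exact Or.inr ⟨⟨x, hx⟩, ⟨y + 1, by rw [← solDPow, ← hy]⟩⟩
            · have e1 : min lo (PySem.Int.floordiv hi 2) = hi / 2 := by omega
              have e2 : max lo (PySem.Int.floordiv hi 2) = lo := by omega
              rw [e1, e2]
              exact Or.inl ⟨⟨y + 1, by rw [← solDPow, ← hy]⟩, ⟨x, hx⟩⟩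
      | true =>
        rw [Bool.true_or]
        obtain ⟨⟨A, hA⟩, ⟨B, hB⟩, hsh⟩ := hinv
        rcases hsh with h' | h'
        · have e1 : min lo (PySem.Int.floordiv hi 2) = hi / 2 := by omega
          have e2 : max lo (PySem.Int.floordiv hi 2) = hi := by omega
          rw [e1, e2]
          exact ⟨⟨A, hA⟩, ⟨B, hB⟩, Or.inr rfl⟩
        · have e1 : min lo (PySem.Int.floordiv hi 2) = hi / 2 := by omega
          have e2 : max lo (PySem.Int.floordiv hi 2) = hi / 2 := by omega
          rw [e1, e2]
          exact ⟨⟨A + 1, by rw [← solDPow, ← hA]⟩, ⟨B + 1, by rw [← solDPow, ← hB]⟩, Or.inl rfl⟩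

theorem solDAux_irrel (w0 w1 : Int) :
    ∀ n m t lo hi, lo ≤ hi →
      2 * hi.toNat + (if lo < hi then 0 else 1) < n →
      2 * hi.toNat + (if lo < hi then 0 else 1) < m →
      solDAux w0 w1 n t lo hi = solDAux w0 w1 m t lo hi := by
  intro n
  induction n with
  | zero => intro m t lo hi _ h _; omega
  | succ n ih =>
    intro m t lo hi hlh hn hm
    match m, hm with
    | m+1, _ =>
    rename_i hm2
    rw [solDAux_succ, solDAux_succ]
    split_ifs with g1 g2
    · rfl
    · rfl
    · have hfd : PySem.Int.floordiv hi 2 = hi / 2 :=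
        PySem.Int.floordiv_eq_ediv_of_pos (by omega)
      have hh2 : 0 ≤ PySem.Int.floordiv hi 2 ∧ PySem.Int.floordiv hi 2 < hi := by omega
      have hsort : min lo (PySem.Int.floordiv hi 2) ≤ max lo (PySem.Int.floordiv hi 2) := by
        omega
      have hM : (max lo (PySem.Int.floordiv hi 2)).toNat < hi.toNat ∨
          ((if lo < hi then (0:Nat) else 1) = 1 ∧
           (max lo (PySem.Int.floordiv hi 2)).toNat = hi.toNat ∧
           (if min lo (PySem.Int.floordiv hi 2) < max lo (PySem.Int.floordiv hi 2)
             then (0:Nat) else 1) = 0) := by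
        by_cases hlt : lo < hi
        · left; omega
        · right
          refine ⟨by rw [if_neg hlt], by omega, ?_⟩
          rw [if_pos (by omega :
            min lo (PySem.Int.floordiv hi 2) < max lo (PySem.Int.floordiv hi 2))]
      have hup : (if min lo (PySem.Int.floordiv hi 2) < max lo (PySem.Int.floordiv hi 2)
          then (0:Nat) else 1) ≤ 1 := by split_ifs <;> omega
      exact ih m _ _ _ hsort (by omega) (by omega)

-- the recurrence solD satisfies on sorted pairs (by exactness of the bound)
theorem solD_eq (w0 w1 : Int) (t : Bool) (lo hi : Int) (hlh : lo ≤ hi) :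
    solD w0 w1 t lo hi =
      if hi ≤ 0 then false
      else if lo ≤ w0 ∧ hi ≤ w1 then t && decide (w0 < hi)
      else solD w0 w1 (t || decide (lo = hi))
        (min lo (PySem.Int.floordiv hi 2)) (max lo (PySem.Int.floordiv hi 2)) := by
  show solDAux w0 w1 (2 * hi.toNat + 1 + 1) t lo hi = _
  rw [solDAux_succ]
  split_ifs with g1 g2
  · rfl
  · rfl
  · have hfd : PySem.Int.floordiv hi 2 = hi / 2 :=
      PySem.Int.floordiv_eq_ediv_of_pos (by omega)
    have hh2 : 0 ≤ PySem.Int.floordiv hi 2 ∧ PySem.Int.floordiv hi 2 < hi := by omega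
    have hsort : min lo (PySem.Int.floordiv hi 2) ≤ max lo (PySem.Int.floordiv hi 2) := by
      omega
    have hM : (max lo (PySem.Int.floordiv hi 2)).toNat < hi.toNat ∨
        ((if lo < hi then (0:Nat) else 1) = 1 ∧
         (max lo (PySem.Int.floordiv hi 2)).toNat = hi.toNat ∧
         (if min lo (PySem.Int.floordiv hi 2) < max lo (PySem.Int.floordiv hi 2)
           then (0:Nat) else 1) = 0) := by
      by_cases hlt : lo < hi
      · left; omega
      · right
        refine ⟨by rw [if_neg hlt], by omega, ?_⟩
        rw [if_pos (by omega :
          min lo (PySem.Int.floordiv hi 2) < max lo (PySem.Int.floordiv hi 2))]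
    have hup : (if min lo (PySem.Int.floordiv hi 2) < max lo (PySem.Int.floordiv hi 2)
        then (0:Nat) else 1) ≤ 1 := by split_ifs <;> omega
    have hlt0 : (if lo < hi then (0:Nat) else 1) ≤ 1 := by split_ifs <;> omega
    exact solDAux_irrel w0 w1 _ _ _ _ _ hsort (by omega) (by omega)

theorem solFoldA_acc (w0 w1 : Int) (f : Nat) :
    ∀ p q a, solFoldA w0 w1 f p q a = a + solFoldA w0 w1 f p q 0 := by
  induction f with
  | zero => intro p q a; simp [solFoldA]
  | succ f ih =>
    intro p q a
    simp only [solFoldA]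
    split_ifs with h1 h2
    · rw [ih _ _ (a + 1), ih _ _ (0 + 1)]; omega
    · rw [ih _ _ (a + 1), ih _ _ (0 + 1)]; omega
    · omega

theorem solFoldA_nonneg (w0 w1 : Int) (f : Nat) :
    ∀ p q, 0 ≤ solFoldA w0 w1 f p q 0 := by
  induction f with
  | zero => intro p q; simp [solFoldA]
  | succ f ih =>
    intro p q
    simp only [solFoldA]
    split_ifs with h1 h2
    · rw [solFoldA_acc]; have := ih (PySem.Int.floordiv p 2) q; omega
    · rw [solFoldA_acc]; have := ih p (PySem.Int.floordiv q 2); omega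
    · omega

theorem solFoldB_acc (s0 s1 : Int) (f : Nat) :
    ∀ lo hi a, solFoldB s0 s1 f lo hi a = a + solFoldB s0 s1 f lo hi 0 := by
  induction f with
  | zero => intro lo hi a; simp [solFoldB]
  | succ f ih =>
    intro lo hi a
    simp only [solFoldB]
    split_ifs with h1
    · rw [ih _ _ (a + 1), ih _ _ (0 + 1)]; omega
    · omega

theorem solFoldA_stop (w0 w1 : Int) (f : Nat) (p q acc : Int) (h : ¬(p > w0 ∨ q > w1)) :
    solFoldA w0 w1 f p q acc = acc := by
  cases f with
  | zero => simp [solFoldA]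
  | succ f => simp only [solFoldA, if_neg h]

theorem solFoldB_stop (s0 s1 : Int) (f : Nat) (lo hi folds : Int) (h : ¬(lo > s0 ∨ hi > s1)) :
    solFoldB s0 s1 f lo hi folds = folds := by
  cases f with
  | zero => simp [solFoldB]
  | succ f => simp only [solFoldB, if_neg h]

-- after the first tie both of A's scans hold the same pair (larger first): equal to B's loop
theorem solAligned (w0 w1 : Int) (hw0 : 0 ≤ w0) (hw1 : 0 ≤ w1) (f : Nat) :
    ∀ p q, (q = p ∨ (1 ≤ p ∧ q = PySem.Int.floordiv p 2)) →
      (w1 ≤ w0 ∨ solD (min w0 w1) (max w0 w1) true (min p q) (max p q) = false) →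
      solFoldA w0 w1 f p q 0 = solFoldB (min w0 w1) (max w0 w1) f (min p q) (max p q) 0 := by
  induction f with
  | zero => intro p q _ _; simp [solFoldA, solFoldB]
  | succ f ih =>
    intro p q hinv hD
    have hqp : q ≤ p ∧ (q = p ∨ (1 ≤ p ∧ 0 ≤ q ∧ q < p)) := by
      rcases hinv with h | ⟨hp, hq⟩
      · omega
      · rw [PySem.Int.floordiv_eq_ediv_of_pos (by omega : (0:Int) < 2)] at hq
        omega
    have hmin : min p q = q := by omega
    have hmax : max p q = p := by omega
    simp only [solFoldA, solFoldB, hmin, hmax]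
    rw [hmin, hmax] at hD
    by_cases hA : p > w0 ∨ q > w1
    · have hp1 : 1 ≤ p := by omega
      have hB : q > min w0 w1 ∨ p > max w0 w1 := by
        by_contra hB
        push_neg at hB
        rcases hD with hc | hc
        · omega
        · rw [solD_eq _ _ _ _ _ (by omega : q ≤ p),
            if_neg (by omega : ¬ p ≤ 0), if_pos ⟨hB.1, hB.2⟩] at hc
          simp only [Bool.true_and, decide_eq_false_iff_not, not_lt] at hc
          omega
      rw [if_pos hA, if_pos hB]
      have hD' : w1 ≤ w0 ∨ solD (min w0 w1) (max w0 w1) true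
          (min q (PySem.Int.floordiv p 2)) (max q (PySem.Int.floordiv p 2)) = false := by
        rcases hD with hc | hc
        · exact Or.inl hc
        · rw [solD_eq _ _ _ _ _ (by omega : q ≤ p),
            if_neg (by omega : ¬ p ≤ 0),
            if_neg (by omega : ¬(q ≤ min w0 w1 ∧ p ≤ max w0 w1))] at hc
          simp only [Bool.true_or] at hc
          exact Or.inr hc
      rcases hinv with heq | ⟨hp, hq⟩
      · subst heq
        have hp1' : 1 ≤ q := by omega
        rw [if_neg (lt_irrefl q)]
        rw [solFoldA_acc, solFoldB_acc _ _ _ _ _ (0 + 1),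
          ih q (PySem.Int.floordiv q 2) (Or.inr ⟨hp1', rfl⟩) hD']
      · subst hq
        have hlt : PySem.Int.floordiv p 2 < p := by
          rw [PySem.Int.floordiv_eq_ediv_of_pos (by omega : (0:Int) < 2)]; omega
        rw [if_pos hlt]
        rw [solFoldA_acc, solFoldB_acc _ _ _ _ _ (0 + 1),
          ih (PySem.Int.floordiv p 2) (PySem.Int.floordiv p 2) (Or.inl rfl) hD']
    · have hB : ¬(q > min w0 w1 ∨ p > max w0 w1) := by omega
      rw [if_neg hA, if_neg hB]

-- a tied starting pair
theorem solTieAligned (w0 w1 : Int) (hw0 : 0 ≤ w0) (hw1 : 0 ≤ w1) (f : Nat) (p : Int)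
    (h : w1 ≤ w0 ∨ solD (min w0 w1) (max w0 w1) false p p = false) :
    solFoldA w0 w1 f p p 0 = solFoldB (min w0 w1) (max w0 w1) f p p 0 := by
  by_cases hA : p > w0 ∨ p > w1
  · have hp1 : 1 ≤ p := by omega
    have hD : w1 ≤ w0 ∨ solD (min w0 w1) (max w0 w1) true (min p p) (max p p) = false := by
      rcases h with h | h
      · exact Or.inl h
      · right
        simp only [min_self, max_self]
        rw [solD_eq _ _ _ _ _ (le_refl p), if_neg (by omega : ¬ p ≤ 0),
          if_neg (by omega : ¬(p ≤ min w0 w1 ∧ p ≤ max w0 w1))] at h ⊢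
        have hdp : (decide (p = p)) = true := decide_eq_true rfl
        rw [hdp, Bool.or_true] at h ⊢
        exact h
    have := solAligned w0 w1 hw0 hw1 f p p (Or.inl rfl) hD
    simpa [min_self, max_self] using this
  · rw [solFoldA_stop _ _ _ _ _ _ hA, solFoldB_stop _ _ _ _ _ _ (by omega)]

-- before a tie A's two scans are swaps of each other: min of the two = B's loop
theorem solFree (w0 w1 : Int) (hw0 : 0 ≤ w0) (hw1 : 0 ≤ w1) (f : Nat) :
    ∀ lo hi, lo < hi →
      (w1 ≤ w0 ∨ solD (min w0 w1) (max w0 w1) false lo hi = false) →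
      min (solFoldA w0 w1 f lo hi 0) (solFoldA w0 w1 f hi lo 0)
        = solFoldB (min w0 w1) (max w0 w1) f lo hi 0 := by
  induction f with
  | zero => intro lo hi _ _; simp [solFoldA, solFoldB]
  | succ f ih =>
    intro lo hi hlh hTD
    by_cases hB : lo > min w0 w1 ∨ hi > max w0 w1
    · have hN : lo > w0 ∨ hi > w1 := by omega
      have hR : hi > w0 ∨ lo > w1 := by omega
      have hhi1 : 1 ≤ hi := by omega
      have hfd : PySem.Int.floordiv hi 2 = hi / 2 :=
        PySem.Int.floordiv_eq_ediv_of_pos (by omega)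
      simp only [solFoldA, solFoldB]
      rw [if_pos hN, if_pos hR, if_pos hB, if_neg (show ¬ lo > hi by omega),
        if_pos (show hi > lo from hlh)]
      rw [solFoldA_acc w0 w1 f lo _ (0 + 1), solFoldA_acc w0 w1 f _ lo (0 + 1),
        solFoldB_acc _ _ _ _ _ (0 + 1)]
      have hTD' : w1 ≤ w0 ∨ solD (min w0 w1) (max w0 w1) false
          (min lo (PySem.Int.floordiv hi 2)) (max lo (PySem.Int.floordiv hi 2)) = false := by
        rcases hTD with h | h
        · exact Or.inl h
        · right
          rw [solD_eq _ _ _ _ _ (le_of_lt hlh), if_neg (by omega : ¬ hi ≤ 0),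
            if_neg (by omega : ¬(lo ≤ min w0 w1 ∧ hi ≤ max w0 w1))] at h
          have hde : (decide (lo = hi)) = false := by
            simp only [decide_eq_false_iff_not]; omega
          rw [hde, Bool.or_false] at h
          exact h
      rcases lt_trichotomy (PySem.Int.floordiv hi 2) lo with hc | hc | hc
      · have e1 : min lo (PySem.Int.floordiv hi 2) = PySem.Int.floordiv hi 2 := by omega
        have e2 : max lo (PySem.Int.floordiv hi 2) = lo := by omega
        rw [e1, e2] at hTD'
        have h3 := ih (PySem.Int.floordiv hi 2) lo hc hTD'
        rw [e1, e2]
        omega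
      · have e1 : min lo (PySem.Int.floordiv hi 2) = lo := by omega
        have e2 : max lo (PySem.Int.floordiv hi 2) = lo := by omega
        rw [e1, e2] at hTD'
        have h3 := solTieAligned w0 w1 hw0 hw1 f lo hTD'
        rw [hc]
        simp only [min_self, max_self]
        omega
      · have e1 : min lo (PySem.Int.floordiv hi 2) = lo := by omega
        have e2 : max lo (PySem.Int.floordiv hi 2) = PySem.Int.floordiv hi 2 := by omega
        rw [e1, e2] at hTD'
        have h3 := ih lo (PySem.Int.floordiv hi 2) hc hTD'
        rw [e1, e2]
        omega
    · rw [solFoldB_stop _ _ _ _ _ _ hB]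
      by_cases hN : lo > w0 ∨ hi > w1
      · have hR : ¬(hi > w0 ∨ lo > w1) := by omega
        rw [solFoldA_stop _ _ _ _ _ _ hR]
        have h1 := solFoldA_nonneg w0 w1 (f + 1) lo hi
        omega
      · rw [solFoldA_stop _ _ _ _ _ _ hN]
        have h1 := solFoldA_nonneg w0 w1 (f + 1) hi lo
        omega

theorem solGet0 (a b : Int) (t : List Int) : (PySem.List.pyGet? (a :: b :: t) 0).getD 0 = a := by
  simp [PySem.List.pyGet?_zero_cons]

theorem solGet1 (a b : Int) (t : List Int) : (PySem.List.pyGet? (a :: b :: t) 1).getD 0 = b := by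
  simp [PySem.List.pyGet?, PySem.List.pyIdx?]

-- ===== VERDICT (by name: the statement is the Claim_ definition above) =====
theorem solution_spec : Claim_unchanged_solution := by
  intro wallet bill hdom hpre
  obtain ⟨hwl, hbl, hrest⟩ := hpre
  match wallet, hwl with
  | w0 :: w1 :: wt, _ =>
  match bill, hbl with
  | b0 :: b1 :: bt, _ =>
  simp only [List.getD, List.getElem?_cons_zero, List.getElem?_cons_succ,
    Option.getD_some] at hrest
  unfold Spec_solution
  intro hnD
  unfold D_solution at hnD
  simp only [List.getD, List.getElem?_cons_zero, List.getElem?_cons_succ,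
    Option.getD_some] at hnD
  unfold solution solution_alt
  simp only [solGet0, solGet1]
  rcases hrest with ⟨hw0, hw1⟩ | hfit
  · have hTD : w1 ≤ w0 ∨ solD (min w0 w1) (max w0 w1) false
        (min b0 b1) (max b0 b1) = false := by
      by_cases hw : w0 < w1
      · right
        have e1 : min w0 w1 = w0 := by omega
        have e2 : max w0 w1 = w1 := by omega
        rw [e1, e2]
        cases h' : solD w0 w1 false (min b0 b1) (max b0 b1) with
        | false => rfl
        | true =>
          exfalso
          simp only [Dom_solution, pvDomInt, List.all_cons, Bool.and_eq_true,
            decide_eq_true_eq] at hdom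
          have hbase : solStages (min b0 b1) (max b0 b1) false (min b0 b1) (max b0 b1) :=
            Or.inl ⟨⟨0, by simp⟩, ⟨0, by simp⟩⟩
          obtain ⟨a, ha, b, hbb, hq, h1, h2, h3⟩ :=
            solDAux_imp w0 w1 (min b0 b1) (max b0 b1) (by omega) (by omega)
              _ false _ _ min_le_max hbase h'
          apply hnD
          rcases le_total b0 b1 with hc | hc
          · have e3 : min b0 b1 = b0 := by omega
            have e4 : max b0 b1 = b1 := by omega
            rw [e3] at hq h1 h2 h3
            rw [e4] at hq
            exact ⟨hw, a, ha, b, hbb, hq, h1, h2, h3⟩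
          · have e3 : min b0 b1 = b1 := by omega
            have e4 : max b0 b1 = b0 := by omega
            rw [e3] at hq h1 h2 h3
            rw [e4] at hq
            refine ⟨hw, b, hbb, a, ha, hq.symm, ?_, ?_, ?_⟩
            · rw [← hq]; exact h1
            · rw [← hq]; exact h2
            · rw [← hq]; exact h3
      · exact Or.inl (by omega)
    rcases lt_trichotomy b0 b1 with hb | hb | hb
    · have e1 : min b0 b1 = b0 := by omega
      have e2 : max b0 b1 = b1 := by omega
      rw [e1, e2] at hTD ⊢
      exact solFree w0 w1 hw0 hw1 solFuel b0 b1 hb hTD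
    · subst hb
      simp only [min_self, max_self] at hTD ⊢
      exact solTieAligned w0 w1 hw0 hw1 solFuel b0 hTD
    · have e1 : min b0 b1 = b1 := by omega
      have e2 : max b0 b1 = b0 := by omega
      rw [e1, e2] at hTD ⊢
      have h3 := solFree w0 w1 hw0 hw1 solFuel b1 b0 hb hTD
      omega
  · rw [solFoldA_stop _ _ _ _ _ _ (by omega), solFoldA_stop _ _ _ _ _ _ (by omega),
      solFoldB_stop _ _ _ _ _ _ (by omega)]
    omega

theorem solution_changed : Claim_changed_solution := by
  unfold Claim_changed_solution
  refine ⟨by decide, by decide, by decide, by decide, by decide, by decide⟩
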